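-- pv_equiv track=rewrite | github.com/HeathenUK/8bit-cpu | MK1_CPU/code/mk1ir.py | seq_stack_balanced
-- ===== SOURCE A (Python) =====
-- def seq_stack_balanced(texts: list[str]) -> bool:
--     """True iff the sequence has balanced push/pop — no trailing imbalance
--     and no intermediate pop-without-push. `exw` (stack from IO) is rejected
--     because its effective stack-delta depends on state, so it's unsafe to
--     extract into a thunk body. A thunk's `ret` requires the stack top to
--     be the jal-pushed return address; any imbalance breaks that."""
--     balance = 0
--     for t in texts:
--         mn = t.split()[0] if t.split() else ''
--         if mn in ('push', 'push_b', 'push_imm'):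
--             balance += 1
--         elif mn in ('pop', 'pop_b'):
--             balance -= 1
--             if balance < 0:
--                 return False
--         elif mn == 'exw':
--             return False
--     return balance == 0
-- ===== SOURCE B (Python) =====
-- def seq_stack_balanced(texts: list[str]) -> bool:
--     # Grammar-based check: classify each line's leading mnemonic, reject any
--     # 'exw', then parse the +/- token string against the Dyck grammar
--     # S -> '(' S ')' S | ''  by recursive descent; balanced iff all consumed.
--     mns = [(t.split() or [''])[0] for t in texts]
--     if 'exw' in mns:
--         return False
--     kinds = [1 if m in ('push', 'push_b', 'push_imm') else -1
--              for m in mns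
--              if m in ('push', 'push_b', 'push_imm', 'pop', 'pop_b')]
--
--     def parse(ks):
--         # consume a maximal S-derivation; return unconsumed suffix, or None on
--         # a push with no matching pop
--         if ks and ks[0] == 1:
--             rest = parse(ks[1:])
--             if rest is None or not rest or rest[0] != -1:
--                 return None
--             return parse(rest[1:])
--         return ks
--
--     return parse(kinds) == []
-- ===== Notes on version B (the rewrite author's own statement) =====
-- stated objective: alternative
-- what changed: Replaces A's running-counter loop with early returns by a staged pipeline that classifies lines into +/- tokens and then checks balance by a recursive-descent parse of the Dyck grammar S -> '(' S ')' S | '', accepting iff the whole token string is consumed.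
import Mathlib
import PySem

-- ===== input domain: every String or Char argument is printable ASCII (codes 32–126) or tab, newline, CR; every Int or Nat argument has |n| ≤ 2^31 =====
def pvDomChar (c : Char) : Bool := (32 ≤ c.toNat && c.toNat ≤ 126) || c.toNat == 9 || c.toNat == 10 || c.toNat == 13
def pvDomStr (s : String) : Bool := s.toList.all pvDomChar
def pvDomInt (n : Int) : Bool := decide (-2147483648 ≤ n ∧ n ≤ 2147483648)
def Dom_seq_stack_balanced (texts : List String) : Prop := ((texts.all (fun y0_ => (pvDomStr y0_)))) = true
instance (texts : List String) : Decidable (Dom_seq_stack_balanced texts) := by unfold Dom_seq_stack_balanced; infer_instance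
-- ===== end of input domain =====

-- B replaces A's running-counter loop by a staged pipeline: classify lines into +/- tokens, then a recursive-descent Dyck-grammar parse; objective: alternative algorithm, same cost.

-- ===== PORT A =====
-- early-return loop as structural recursion over (texts, balance)
def seqGoA : List String → Int → Bool
  | [], balance => balance == 0
  | t :: rest, balance =>
    let mn := if (PySem.Str.split₀ t).isEmpty then "" else (PySem.Str.split₀ t).headD ""
    if mn == "push" || mn == "push_b" || mn == "push_imm" then
      seqGoA rest (balance + 1)
    else if mn == "pop" || mn == "pop_b" then
      if balance - 1 < 0 then false else seqGoA rest (balance - 1)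
    else if mn == "exw" then false
    else seqGoA rest balance

def seq_stack_balanced (texts : List String) : Bool := seqGoA texts 0

-- ===== PORT B =====
-- (t.split() or [''])[0]
def pvLead (t : String) : String :=
  match PySem.Str.split₀ t with
  | [] => ""
  | m :: _ => m

-- the classifying filter of Source B's `kinds` comprehension
def pvToKind (m : String) : Option Int :=
  if m == "push" || m == "push_b" || m == "push_imm" then some 1
  else if m == "pop" || m == "pop_b" then some (-1) else none

-- Source B's recursive `parse`; the fuel argument only makes the recursion
-- structurally total (fuel `length + 1` is always sufficient, lemma below);
-- `none` = Python's None
def parseB : Nat → List Int → Option (List Int)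
  | 0, _ => none
  | _ + 1, [] => some []
  | f + 1, k :: ks =>
    if k == 1 then
      match parseB f ks with
      | some (k' :: r) => if k' == -1 then parseB f r else none
      | _ => none
    else some (k :: ks)

def seq_stack_balanced_alt (texts : List String) : Bool :=
  let mns := texts.map pvLead
  if mns.contains "exw" then false
  else
    let kinds := mns.filterMap pvToKind
    parseB (kinds.length + 1) kinds == some []

-- ===== PRECONDITION & SPEC =====
def Spec_seq_stack_balanced (texts : List String) (out : Bool) : Prop := out = seq_stack_balanced_alt texts
instance (texts : List String) (out : Bool) : Decidable (Spec_seq_stack_balanced texts out) := by unfold Spec_seq_stack_balanced; infer_instance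

-- ===== CLAIM (what is proved, stated in full; the proofs are below) =====
def Claim_equal_seq_stack_balanced : Prop := ∀ (texts : List String), Dom_seq_stack_balanced texts → Spec_seq_stack_balanced texts (seq_stack_balanced texts)

-- ===== LEMMAS AND PROOFS =====

-- delta of one mnemonic, as A applies it
def pvDelta (m : String) : Int :=
  if m == "push" || m == "push_b" || m == "push_imm" then 1
  else if m == "pop" || m == "pop_b" then -1 else 0

-- A's loop, functionally: prefix sums never negative
def pvOk : Int → List String → Bool
  | _, [] => true
  | s, m :: ms => (decide (0 ≤ s + pvDelta m)) && pvOk (s + pvDelta m) ms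

def pvTot (ms : List String) : Int := (ms.map pvDelta).sum

-- same, over the ±1 kind tokens
def okC : Int → List Int → Bool
  | _, [] => true
  | c, k :: ks => (decide (0 ≤ c + k)) && okC (c + k) ks

-- iterative description of parseB's value (counter = open pushes of the call chain)
def pSpec : Int → List Int → Option (List Int)
  | c, [] => if c = 0 then some [] else none
  | c, k :: ks => if k = 1 then pSpec (c + 1) ks else if c = 0 then some (k :: ks) else pSpec (c - 1) ks

theorem pv_goA_eq (texts : List String) (b : Int) (hb : 0 ≤ b) :
    seqGoA texts b =
      (!(texts.map pvLead).contains "exw" && pvOk b (texts.map pvLead)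
        && (b + pvTot (texts.map pvLead) == 0)) := by
  induction texts generalizing b with
  | nil => simp [seqGoA, pvOk, pvTot]
  | cons t rest ih =>
    have hlead : (if (PySem.Str.split₀ t).isEmpty then "" else (PySem.Str.split₀ t).headD "")
        = pvLead t := by
      unfold pvLead; cases PySem.Str.split₀ t <;> simp
    rw [seqGoA, hlead]
    simp only [List.map_cons]
    generalize pvLead t = m
    by_cases h1 : m = "push" ∨ m = "push_b" ∨ m = "push_imm"
    · have hd : pvDelta m = 1 := by
        rcases h1 with h | h | h <;> rw [h] <;> decide
      have hne : m ≠ "exw" := by rcases h1 with h | h | h <;> simp [h]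
      have hcond : (m == "push" || m == "push_b" || m == "push_imm") = true := by
        rcases h1 with h | h | h <;> simp [h]
      have h01 : (0 : Int) ≤ b + 1 := by omega
      simp [hcond, ih (b + 1) (by omega), pvOk, pvTot, hd, Ne.symm hne, h01, Int.add_assoc]
    · push Not at h1
      obtain ⟨hp1, hp2, hp3⟩ := h1
      have hcond : (m == "push" || m == "push_b" || m == "push_imm") = false := by
        simp [hp1, hp2, hp3]
      by_cases h2 : m = "pop" ∨ m = "pop_b"
      · have hd : pvDelta m = -1 := by
          rcases h2 with h | h <;> rw [h] <;> decide
        have hne : m ≠ "exw" := by rcases h2 with h | h <;> simp [h]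
        have hcond2 : (m == "pop" || m == "pop_b") = true := by
          rcases h2 with h | h <;> simp [h]
        by_cases hneg : b - 1 < 0
        · have hlt : ¬ ((0 : Int) ≤ b + -1) := by omega
          have hlt1 : b < 1 := by omega
          simp [hcond, hcond2, hlt1, pvOk, hd, hlt]
        · have hge : (0 : Int) ≤ b + -1 := by omega
          have hlt1 : ¬ b < 1 := by omega
          have ihb := ih (b - 1) (by omega)
          rw [show b - 1 = b + -1 from by ring] at ihb
          simp [hcond, hcond2, hlt1, ihb, pvOk, pvTot, hd, Ne.symm hne,
            hge, Int.add_assoc, show b - 1 = b + -1 from by ring]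
      · push Not at h2
        obtain ⟨hq1, hq2⟩ := h2
        have hcond2 : (m == "pop" || m == "pop_b") = false := by simp [hq1, hq2]
        by_cases h3 : m = "exw"
        · simp [h3]
        · have hd : pvDelta m = 0 := by
            simp [pvDelta, hp1, hp2, hp3, hq1, hq2]
          simp [hcond, hcond2, Ne.symm h3, h3, ih b hb, pvOk, pvTot, hd, hb]

-- bridge: A's scan over all mnemonics = scan over the classified ±1 tokens
theorem pv_ok_bridge (ms : List String) (c : Int) (hc : 0 ≤ c) :
    pvOk c ms = okC c (ms.filterMap pvToKind) := by
  induction ms generalizing c with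
  | nil => rfl
  | cons m ms ih =>
    rw [List.filterMap_cons]
    by_cases h1 : (m == "push" || m == "push_b" || m == "push_imm") = true
    · have hk : pvToKind m = some 1 := by unfold pvToKind; rw [if_pos h1]
      have hd : pvDelta m = 1 := by unfold pvDelta; rw [if_pos h1]
      rw [hk]
      show pvOk c (m :: ms) = okC c (1 :: ms.filterMap pvToKind)
      unfold pvOk okC
      rw [hd, ih (c + 1) (by omega)]
    · by_cases h2 : (m == "pop" || m == "pop_b") = true
      · have hk : pvToKind m = some (-1) := by
          unfold pvToKind; rw [if_neg (by simp_all), if_pos h2]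
        have hd : pvDelta m = -1 := by
          unfold pvDelta; rw [if_neg (by simp_all), if_pos h2]
        rw [hk]
        show pvOk c (m :: ms) = okC c ((-1) :: ms.filterMap pvToKind)
        unfold pvOk okC
        rw [hd]
        by_cases hge : (0 : Int) ≤ c + -1
        · rw [ih (c + -1) hge]
        · simp [hge]
      · have hk : pvToKind m = none := by
          unfold pvToKind; rw [if_neg (by simp_all), if_neg (by simp_all)]
        have hd : pvDelta m = 0 := by
          unfold pvDelta; rw [if_neg (by simp_all), if_neg (by simp_all)]
        rw [hk]
        show pvOk c (m :: ms) = okC c (ms.filterMap pvToKind)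
        unfold pvOk
        rw [hd, add_zero, ih c hc]
        simp [hc]

theorem pv_tot_bridge (ms : List String) :
    pvTot ms = (ms.filterMap pvToKind).sum := by
  induction ms with
  | nil => rfl
  | cons m ms ih =>
    rw [List.filterMap_cons]
    have e : pvTot (m :: ms) = pvDelta m + pvTot ms := by
      unfold pvTot
      rw [List.map_cons, List.sum_cons]
    by_cases h1 : (m == "push" || m == "push_b" || m == "push_imm") = true
    · have hk : pvToKind m = some 1 := by unfold pvToKind; rw [if_pos h1]
      have hd : pvDelta m = 1 := by unfold pvDelta; rw [if_pos h1]
      rw [hk, e, hd, List.sum_cons, ih]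
    · by_cases h2 : (m == "pop" || m == "pop_b") = true
      · have hk : pvToKind m = some (-1) := by
          unfold pvToKind; rw [if_neg (by simp_all), if_pos h2]
        have hd : pvDelta m = -1 := by
          unfold pvDelta; rw [if_neg (by simp_all), if_pos h2]
        rw [hk, e, hd, List.sum_cons, ih]
      · have hk : pvToKind m = none := by
          unfold pvToKind; rw [if_neg (by simp_all), if_neg (by simp_all)]
        have hd : pvDelta m = 0 := by
          unfold pvDelta; rw [if_neg (by simp_all), if_neg (by simp_all)]
        rw [hk, e, hd, ih, zero_add]

theorem pv_kind_pm (ms : List String) :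
    ∀ k ∈ ms.filterMap pvToKind, k = 1 ∨ k = -1 := by
  intro k hk
  rcases List.mem_filterMap.mp hk with ⟨m, _, hm⟩
  unfold pvToKind at hm
  split_ifs at hm <;> simp_all

-- where pSpec returns `some`, the result is a suffix-sized sublist headed by -1 (or empty)
theorem pv_pSpec_shape (ks : List Int) (hpm : ∀ k ∈ ks, k = 1 ∨ k = -1) (c : Int)
    (r : List Int) (h : pSpec c ks = some r) :
    r.length ≤ ks.length ∧ (∀ x ∈ r, x ∈ ks) ∧ (r = [] ∨ ∃ r', r = (-1) :: r') := by
  induction ks generalizing c with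
  | nil =>
    unfold pSpec at h
    split_ifs at h
    · simp_all
  | cons k ks ih =>
    unfold pSpec at h
    split_ifs at h with h1 h2
    · have := ih (fun x hx => hpm x (List.mem_cons_of_mem _ hx)) (c + 1) h
      exact ⟨Nat.le_succ_of_le this.1,
        fun x hx => List.mem_cons_of_mem _ (this.2.1 x hx), this.2.2⟩
    · rcases hpm k (List.mem_cons_self) with hk | hk
      · exact absurd hk h1
      · have hr : r = k :: ks := (Option.some.inj h).symm
        subst hr
        exact ⟨by simp, fun x hx => hx, Or.inr ⟨ks, by rw [hk]⟩⟩
    · have := ih (fun x hx => hpm x (List.mem_cons_of_mem _ hx)) (c - 1) h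
      exact ⟨Nat.le_succ_of_le this.1,
        fun x hx => List.mem_cons_of_mem _ (this.2.1 x hx), this.2.2⟩

-- composition: running pSpec with one extra open push
theorem pv_pSpec_comp (n : Nat) : ∀ (ks : List Int), ks.length ≤ n →
    (∀ k ∈ ks, k = 1 ∨ k = -1) → ∀ (c : Int), 0 ≤ c →
    pSpec (c + 1) ks =
      (match pSpec 0 ks with
       | some ((-1) :: r) => pSpec c r
       | _ => none) := by
  induction n with
  | zero =>
    intro ks hlen _ c hc
    have : ks = [] := List.eq_nil_of_length_eq_zero (Nat.le_zero.mp hlen)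
    subst this
    simp [pSpec, show c + 1 ≠ 0 by omega]
  | succ n ih =>
    intro ks hlen hpm c hc
    match ks with
    | [] => simp [pSpec, show c + 1 ≠ 0 by omega]
    | k :: ks' =>
      have hpm' : ∀ x ∈ ks', x = 1 ∨ x = -1 := fun x hx => hpm x (List.mem_cons_of_mem _ hx)
      have hlen' : ks'.length ≤ n := by simpa using hlen
      rcases hpm k (List.mem_cons_self) with hk | hk
      · subst hk
        have e1 : pSpec (c + 1) (1 :: ks') = pSpec (c + 1 + 1) ks' := by simp [pSpec]
        have e2 : pSpec 0 (1 :: ks') = pSpec (0 + 1) ks' := by simp [pSpec]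
        rw [e1, e2, ih ks' hlen' hpm' (c + 1) (by omega), ih ks' hlen' hpm' 0 (by omega)]
        cases h0 : pSpec 0 ks' with
        | none => simp
        | some r =>
          obtain ⟨hrl, hrsub, hrsh⟩ := pv_pSpec_shape ks' hpm' 0 r h0
          rcases hrsh with hr | ⟨r', hr⟩
          · subst hr; simp
          · subst hr
            have hr'len : r'.length ≤ n := by simp at hrl; omega
            have hr'pm : ∀ x ∈ r', x = 1 ∨ x = -1 := fun x hx =>
              hpm' x (hrsub x (List.mem_cons_of_mem _ hx))
            simp only
            rw [ih r' hr'len hr'pm c hc]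
      · subst hk
        simp [pSpec, show c + 1 ≠ 0 by omega, show ¬ ((-1 : Int) = 1) by norm_num]

-- fuel sufficiency: parseB with fuel > length computes pSpec 0
theorem pv_parseB_eq (f : Nat) : ∀ (ks : List Int), ks.length < f →
    (∀ k ∈ ks, k = 1 ∨ k = -1) → parseB f ks = pSpec 0 ks := by
  induction f with
  | zero => intro ks h; omega
  | succ f ih =>
    intro ks hlen hpm
    match ks with
    | [] => simp [parseB, pSpec]
    | k :: ks' =>
      have hpm' : ∀ x ∈ ks', x = 1 ∨ x = -1 := fun x hx => hpm x (List.mem_cons_of_mem _ hx)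
      have hlen' : ks'.length < f := by simp at hlen; omega
      rcases hpm k (List.mem_cons_self) with hk | hk
      · subst hk
        have e2 : pSpec 0 (1 :: ks') = pSpec (0 + 1) ks' := by simp [pSpec]
        rw [e2, pv_pSpec_comp ks'.length ks' le_rfl hpm' 0 le_rfl]
        show (match parseB f ks' with
              | some (k' :: r) => if k' == -1 then parseB f r else none
              | _ => none) = _
        rw [ih ks' hlen' hpm']
        cases h0 : pSpec 0 ks' with
        | none => simp
        | some r =>
          obtain ⟨hrl, hrsub, hrsh⟩ := pv_pSpec_shape ks' hpm' 0 r h0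
          rcases hrsh with hr | ⟨r', hr⟩
          · subst hr; simp
          · subst hr
            have hr'len : r'.length < f := by simp at hrl; omega
            have hr'pm : ∀ x ∈ r', x = 1 ∨ x = -1 := fun x hx =>
              hpm' x (hrsub x (List.mem_cons_of_mem _ hx))
            simp only [show ((-1 : Int) == -1) = true by decide, if_true]
            exact ih r' hr'len hr'pm
      · subst hk
        have e : parseB (f + 1) ((-1) :: ks') = some ((-1) :: ks') := by
          simp [parseB]
        rw [e]
        simp [pSpec, show ¬ ((-1 : Int) = 1) by norm_num]

-- pSpec accepts exactly when all prefix sums stay ≥ 0 and the total is 0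
theorem pv_pSpec_accept (ks : List Int) (hpm : ∀ k ∈ ks, k = 1 ∨ k = -1) (c : Int)
    (hc : 0 ≤ c) : (pSpec c ks == some []) = (okC c ks && (c + ks.sum == 0)) := by
  induction ks generalizing c with
  | nil =>
    by_cases h : c = 0 <;> simp [pSpec, okC, h]
  | cons k ks ih =>
    have hpm' : ∀ x ∈ ks, x = 1 ∨ x = -1 := fun x hx => hpm x (List.mem_cons_of_mem _ hx)
    rcases hpm k (List.mem_cons_self) with hk | hk
    · subst hk
      have e : pSpec c (1 :: ks) = pSpec (c + 1) ks := by simp [pSpec]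
      rw [e, ih hpm' (c + 1) (by omega)]
      have : (0 : Int) ≤ c + 1 := by omega
      simp only [okC, List.sum_cons, this, decide_true, Bool.true_and]
      have : c + 1 + ks.sum = c + (1 + ks.sum) := by ring
      rw [this]
    · subst hk
      by_cases h0 : c = 0
      · subst h0
        have e : pSpec 0 ((-1) :: ks) = some ((-1) :: ks) := by
          simp [pSpec, show ¬ ((-1 : Int) = 1) by norm_num]
        simp [e, okC]
      · have e : pSpec c ((-1) :: ks) = pSpec (c - 1) ks := by
          simp [pSpec, show ¬ ((-1 : Int) = 1) by norm_num, h0]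
        rw [e, ih hpm' (c - 1) (by omega)]
        have h1 : (0 : Int) ≤ c + -1 := by omega
        simp only [okC, List.sum_cons, h1, decide_true, Bool.true_and]
        have e1 : c - 1 = c + -1 := by ring
        have e2 : c + -1 + ks.sum = c + (-1 + ks.sum) := by ring
        rw [e1, e2]

-- ===== VERDICT (by name: the statement is the Claim_ definition above) =====
theorem seq_stack_balanced_spec : Claim_equal_seq_stack_balanced := by
  intro texts _
  unfold Spec_seq_stack_balanced seq_stack_balanced seq_stack_balanced_alt
  rw [pv_goA_eq texts 0 le_rfl]
  cases hc : (texts.map pvLead).contains "exw" with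
  | true => simp only [hc, Bool.not_true, Bool.false_and, if_true]
  | false =>
    simp only [hc, Bool.not_false, Bool.true_and, if_false, Bool.false_eq_true]
    set kinds := (texts.map pvLead).filterMap pvToKind with hkinds
    have hpm := pv_kind_pm (texts.map pvLead)
    rw [pv_parseB_eq (kinds.length + 1) kinds (Nat.lt_succ_self _) hpm,
      pv_pSpec_accept kinds hpm 0 le_rfl,
      pv_ok_bridge (texts.map pvLead) 0 le_rfl, pv_tot_bridge]
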